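-- pv_equiv track=rewrite | github.com/rsbohn/waffle8 | demo/scripts/visual_tape_reader.py | parse_bits
-- ===== SOURCE A (Python) =====
-- from typing import List, Tuple
--
-- def parse_bits(text: str) -> Tuple[List[int], str]:
--     """Parse a bit-text into 12-bit words. Returns (words, error) where error is '' on success."""
--     bits = []
--     for ch in text:
--         if ch.isspace():
--             continue
--         if ch == '#':
--             break
--         if ch not in '01':
--             return [], f"invalid bit char '{ch}'"
--         bits.append(ch)
--     if len(bits) == 0:
--         return [], "empty bit string"
--     if len(bits) % 12 != 0:
--         return [], f"bit count {len(bits)} not multiple of 12"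
--     words = []
--     for i in range(0, len(bits), 12):
--         wbits = ''.join(bits[i:i+12])
--         words.append(int(wbits, 2) & 0x0FFF)
--     return words, ''
-- ===== SOURCE B (Python) =====
-- def parse_bits(text):
--     """Parse a bit-text into 12-bit words. Returns (words, error) where error is '' on success."""
--     words = []
--     acc = 0
--     count = 0
--     for ch in text:
--         if ch.isspace():
--             continue
--         if ch == '#':
--             break
--         if ch != '0' and ch != '1':
--             return [], f"invalid bit char '{ch}'"
--         acc = acc * 2 + (1 if ch == '1' else 0)
--         count += 1
--         if count == 12:
--             words.append(acc & 0x0FFF)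
--             acc = 0
--             count = 0
--     total = 12 * len(words) + count
--     if total == 0:
--         return [], "empty bit string"
--     if count != 0:
--         return [], f"bit count {total} not multiple of 12"
--     return words, ''
-- ===== Notes on version B (the rewrite author's own statement) =====
-- stated objective: simpler
-- what changed: B replaces A's collect-all-bits-into-a-list-then-chunk-slices-and-reparse-with-int(s,2) scheme by a single streaming pass that keeps a running integer accumulator and a bit counter and emits each 12-bit word as soon as it completes, never materialising the bit list.
import Mathlib
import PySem

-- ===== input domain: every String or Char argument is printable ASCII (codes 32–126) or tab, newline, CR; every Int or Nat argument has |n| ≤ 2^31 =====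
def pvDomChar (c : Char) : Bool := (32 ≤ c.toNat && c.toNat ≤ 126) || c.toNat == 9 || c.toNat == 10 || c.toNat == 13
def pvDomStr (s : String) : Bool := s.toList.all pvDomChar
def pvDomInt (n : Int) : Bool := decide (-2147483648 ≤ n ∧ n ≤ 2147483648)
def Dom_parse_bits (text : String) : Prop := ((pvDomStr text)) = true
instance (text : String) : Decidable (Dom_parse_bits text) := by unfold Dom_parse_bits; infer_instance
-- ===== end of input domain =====

-- B replaces A's collect-all-bits-then-chunk-and-reparse scheme by a single streaming pass
-- with an integer accumulator and bit counter (objective: simpler decomposition, one pass, no intermediate list).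

-- ===== PORT A =====
-- int(wbits, 2) is ported by hand as a fold; exact for the nonempty '0'/'1' strings this code builds
def pvBinVal (cs : List Char) : Int :=
  cs.foldl (fun a c => a * 2 + (if c = '1' then 1 else 0)) 0

-- the first loop: collect non-space bit chars, break on '#', early-return on an invalid char
def pvScanA : List Char → List Char → String ⊕ List Char
  | [], bits => Sum.inr bits
  | c :: rest, bits =>
    if PySem.Chars.isspace c then pvScanA rest bits
    else if c = '#' then Sum.inr bits
    else if ¬ (c = '0' ∨ c = '1') then Sum.inl ("invalid bit char '" ++ String.singleton c ++ "'")
    else pvScanA rest (bits ++ [c])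

-- the second loop: for i in range(0, len(bits), 12): words.append(int(''.join(bits[i:i+12]), 2) & 0x0FFF)
def pvWordsA (bits : List Char) : List Int :=
  (PySem.List.pyRange 0 ((bits.length : Int)) 12).foldl
    (fun words i =>
      words ++ [PySem.Int.band (pvBinVal (PySem.List.slice bits (some i) (some (i + 12)))) 0x0FFF]) []

def parse_bits (text : String) : List Int × String :=
  match pvScanA text.toList [] with
  | Sum.inl e => ([], e)
  | Sum.inr bits =>
    if bits.length = 0 then ([], "empty bit string")
    else if PySem.Int.mod ((bits.length : Int)) 12 ≠ 0 then
      ([], "bit count " ++ PySem.Int.toStr ((bits.length : Int)) ++ " not multiple of 12")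
    else (pvWordsA bits, "")

-- ===== PORT B =====
-- streaming pass: running accumulator acc, bit counter count, finished words
def pvScanB : List Char → List Int → Int → Int → String ⊕ (List Int × Int × Int)
  | [], words, acc, count => Sum.inr (words, acc, count)
  | c :: rest, words, acc, count =>
    if PySem.Chars.isspace c then pvScanB rest words acc count
    else if c = '#' then Sum.inr (words, acc, count)
    else if c ≠ '0' ∧ c ≠ '1' then Sum.inl ("invalid bit char '" ++ String.singleton c ++ "'")
    else if count + 1 = 12 then
      pvScanB rest (words ++ [PySem.Int.band (acc * 2 + (if c = '1' then 1 else 0)) 0x0FFF]) 0 0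
    else pvScanB rest words (acc * 2 + (if c = '1' then 1 else 0)) (count + 1)

def parse_bits_alt (text : String) : List Int × String :=
  match pvScanB text.toList [] 0 0 with
  | Sum.inl e => ([], e)
  | Sum.inr (words, _acc, count) =>
    if 12 * ((words.length : Int)) + count = 0 then ([], "empty bit string")
    else if count ≠ 0 then
      ([], "bit count " ++ PySem.Int.toStr (12 * ((words.length : Int)) + count) ++ " not multiple of 12")
    else (words, "")

-- ===== PRECONDITION & SPEC =====
def Spec_parse_bits (text : String) (out : List Int × String) : Prop := out = parse_bits_alt text
instance (text : String) (out : List Int × String) : Decidable (Spec_parse_bits text out) := by unfold Spec_parse_bits; infer_instance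

-- ===== CLAIM (what is proved, stated in full; the proofs are below) =====
def Claim_equal_parse_bits : Prop := ∀ (text : String), Dom_parse_bits text → Spec_parse_bits text (parse_bits text)

-- ===== LEMMAS AND PROOFS =====

-- reference chunking of a fully collected bit list, 12 bits at a time
def wordsOf (cs : List Char) : List Int :=
  if _h : 12 ≤ cs.length then
    PySem.Int.band (pvBinVal (cs.take 12)) 0x0FFF :: wordsOf (cs.drop 12)
  else []
termination_by cs.length
decreasing_by simp only [List.length_drop]; omega

lemma wordsOf_nil : wordsOf [] = [] := by
  rw [wordsOf, dif_neg (by simp)]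

lemma wordsOf_twelve (xs : List Char) (h : xs.length = 12) :
    wordsOf xs = [PySem.Int.band (pvBinVal xs) 0x0FFF] := by
  rw [wordsOf, dif_pos (by omega)]
  rw [List.take_of_length_le (by omega), List.drop_eq_nil_of_le (by omega), wordsOf_nil]

lemma wordsOf_append (xs ys : List Char) (h : 12 ∣ xs.length) :
    wordsOf (xs ++ ys) = wordsOf xs ++ wordsOf ys := by
  obtain ⟨k, hk⟩ := h
  induction k generalizing xs with
  | zero =>
    have : xs = [] := List.length_eq_zero_iff.mp (by omega)
    subst this; simp [wordsOf_nil]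
  | succ k ih =>
    have h12 : 12 ≤ xs.length := by omega
    rw [wordsOf, dif_pos (by simp; omega)]
    rw [show wordsOf xs = _ from by rw [wordsOf, dif_pos h12]]
    rw [List.take_append_of_le_length h12, List.drop_append_of_le_length h12]
    rw [ih (xs.drop 12) (by simp; omega)]
    simp

lemma length_wordsOf (xs : List Char) (h : 12 ∣ xs.length) :
    12 * (wordsOf xs).length = xs.length := by
  obtain ⟨k, hk⟩ := h
  induction k generalizing xs with
  | zero =>
    have : xs = [] := List.length_eq_zero_iff.mp (by omega)
    subst this; simp [wordsOf_nil]
  | succ k ih =>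
    rw [wordsOf, dif_pos (by omega)]
    have := ih (xs.drop 12) (by simp; omega)
    simp only [List.length_cons]
    simp only [List.length_drop] at this
    omega

lemma pvBinVal_append_singleton (p : List Char) (c : Char) :
    pvBinVal (p ++ [c]) = pvBinVal p * 2 + (if c = '1' then 1 else 0) := by
  simp [pvBinVal, List.foldl_append]

-- pyRange with step 12 over a multiple-of-12 span
lemma pvRange12 (a : Int) (m : Nat) :
    PySem.List.pyRange a (a + 12 * (m : Int)) 12 =
      (List.range m).map (fun k : Nat => a + 12 * (k : Int)) := by
  rcases Nat.eq_zero_or_pos m with h | h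
  · subst h
    rw [PySem.List.pyRange_of_pos a _ (by norm_num)]
    simp
  · rw [PySem.List.pyRange_of_pos a _ (by norm_num), if_pos (by omega)]
    rw [show ((a + 12 * (m : Int) - a + 12 - 1) / 12).toNat = m by omega]

lemma pvRange12_cons (a : Int) (m : Nat) (h : 0 < m) :
    PySem.List.pyRange a (a + 12 * (m : Int)) 12 =
      a :: PySem.List.pyRange (a + 12) (a + 12 * (m : Int)) 12 := by
  obtain ⟨m', rfl⟩ : ∃ m', m = m' + 1 := ⟨m - 1, by omega⟩
  rw [pvRange12]
  rw [show a + 12 * ((m' + 1 : Nat) : Int) = (a + 12) + 12 * (m' : Int) by push_cast; ring]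
  rw [pvRange12, List.range_succ_eq_map]
  simp only [List.map_cons, List.map_map, Nat.cast_zero, mul_zero, add_zero]
  congr 1
  apply List.map_congr_left
  intro k _
  simp only [Function.comp_apply]
  push_cast
  ring

-- A's word loop equals wordsOf on a fully chunked list
lemma wordsA_aux (bits : List Char) :
    ∀ (m j : Nat) (ws : List Int), bits.length = 12 * j + 12 * m →
    (PySem.List.pyRange (12 * (j : Int)) ((bits.length : Int)) 12).foldl
      (fun words i =>
        words ++ [PySem.Int.band (pvBinVal (PySem.List.slice bits (some i) (some (i + 12)))) 0x0FFF]) ws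
      = ws ++ wordsOf (bits.drop (12 * j)) := by
  intro m
  induction m with
  | zero =>
    intro j ws hlen
    rw [show ((bits.length : Int)) = 12 * (j : Int) + 12 * ((0 : Nat) : Int) by push_cast; omega]
    rw [pvRange12]
    rw [List.drop_eq_nil_of_le (by omega), wordsOf_nil]
    simp
  | succ m ih =>
    intro j ws hlen
    rw [show ((bits.length : Int)) = 12 * (j : Int) + 12 * ((m + 1 : Nat) : Int) by push_cast; omega]
    rw [pvRange12_cons _ _ (by omega)]
    rw [List.foldl_cons]
    have hsl : PySem.List.slice bits (some (12 * (j : Int))) (some (12 * (j : Int) + 12)) =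
        (bits.drop (12 * j)).take 12 := by
      have := PySem.List.slice_natCast_add bits (12 * j) 12
      simpa using this
    rw [hsl]
    rw [show (12 * (j : Int)) + 12 = 12 * ((j + 1 : Nat) : Int) by push_cast; ring]
    rw [show 12 * (j : Int) + 12 * ((m + 1 : Nat) : Int) = ((bits.length : Int)) by push_cast; omega]
    rw [ih (j + 1) _ (by omega)]
    rw [show wordsOf (bits.drop (12 * j)) = _ from by
      rw [wordsOf, dif_pos (by simp; omega)]]
    rw [show (12 : Nat) * (j + 1) = 12 * j + 12 by ring]
    simp [List.drop_drop, Nat.add_comm]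

lemma wordsA_eq (bits : List Char) (h : 12 ∣ bits.length) :
    pvWordsA bits = wordsOf bits := by
  obtain ⟨m, hm⟩ := h
  have := wordsA_aux bits m 0 [] (by omega)
  simpa [pvWordsA] using this

-- relation between the two scans' results
def pvRel (r1 : String ⊕ List Char) (r2 : String ⊕ (List Int × Int × Int)) : Prop :=
  match r1, r2 with
  | Sum.inl e, Sum.inl e' => e = e'
  | Sum.inr bits, Sum.inr (words, _, count) =>
      ∃ done p, bits = done ++ p ∧ 12 ∣ done.length ∧ p.length < 12 ∧
        words = wordsOf done ∧ count = ((p.length : Int))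
  | _, _ => False

lemma pvMain (cs : List Char) : ∀ (done p : List Char),
    12 ∣ done.length → p.length < 12 →
    pvRel (pvScanA cs (done ++ p)) (pvScanB cs (wordsOf done) (pvBinVal p) ((p.length : Int))) := by
  induction cs with
  | nil =>
    intro done p hd hp
    exact ⟨done, p, rfl, hd, hp, rfl, rfl⟩
  | cons c rest ih =>
    intro done p hd hp
    simp only [pvScanA, pvScanB]
    by_cases hsp : PySem.Chars.isspace c
    · simp only [hsp, if_true]; exact ih done p hd hp
    · simp only [hsp, Bool.false_eq_true, if_false]
      by_cases hh : c = '#'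
      · simp only [hh, if_true]
        exact ⟨done, p, rfl, hd, hp, rfl, rfl⟩
      · simp only [hh, if_false]
        by_cases hbit : c = '0' ∨ c = '1'
        · rw [if_neg (not_not.mpr hbit),
            if_neg (by rcases hbit with h | h <;> simp [h] : ¬ (c ≠ '0' ∧ c ≠ '1'))]
          by_cases h11 : p.length = 11
          · rw [if_pos (by omega : ((p.length : Int)) + 1 = 12)]
            have hb : PySem.Int.band (pvBinVal p * 2 + (if c = '1' then 1 else 0)) 0x0FFF =
                PySem.Int.band (pvBinVal (p ++ [c])) 0x0FFF := by
              rw [pvBinVal_append_singleton]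
            have hw : wordsOf done ++ [PySem.Int.band (pvBinVal (p ++ [c])) 0x0FFF] =
                wordsOf (done ++ (p ++ [c])) := by
              rw [wordsOf_append _ _ hd, wordsOf_twelve (p ++ [c]) (by simp; omega)]
            have key := ih (done ++ (p ++ [c])) [] (by simp; omega) (by simp)
            simp only [List.append_nil] at key
            rw [← hw, ← hb] at key
            rw [List.append_assoc]
            exact key
          · rw [if_neg (by omega : ¬ ((p.length : Int)) + 1 = 12)]
            have key := ih done (p ++ [c]) hd (by simp; omega)
            rw [pvBinVal_append_singleton] at key
            rw [List.append_assoc]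
            have hlc : (((p ++ [c]).length : Int)) = ((p.length : Int)) + 1 := by
              simp
            rw [hlc] at key
            exact key
        · have hbit' : c ≠ '0' ∧ c ≠ '1' := by
            constructor <;> intro hx <;> exact hbit (by simp [hx])
          rw [if_pos hbit, if_pos hbit']
          rfl

-- ===== VERDICT (by name: the statement is the Claim_ definition above) =====
theorem parse_bits_spec : Claim_equal_parse_bits := by
  intro text _
  unfold Spec_parse_bits parse_bits parse_bits_alt
  have h := pvMain text.toList [] [] (by simp) (by simp)
  rw [wordsOf_nil] at h
  simp only [List.nil_append, pvBinVal, List.foldl_nil, List.length_nil, Nat.cast_zero] at h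
  cases hA : pvScanA text.toList [] with
  | inl e =>
    cases hB : pvScanB text.toList [] 0 0 with
    | inl e' =>
      rw [hA, hB] at h
      simp only [pvRel] at h
      rw [h]
    | inr st =>
      rw [hA, hB] at h
      exact absurd h (by obtain ⟨w, a, cnt⟩ := st; simp [pvRel])
  | inr bits =>
    cases hB : pvScanB text.toList [] 0 0 with
    | inl e' =>
      rw [hA, hB] at h
      exact absurd h (by simp [pvRel])
    | inr st =>
      obtain ⟨words, acc, count⟩ := st
      rw [hA, hB] at h
      obtain ⟨done, p, hbp, hdvd, hplt, hw, hcnt⟩ := h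
      subst hbp hw hcnt
      have hwl : 12 * (wordsOf done).length = done.length := length_wordsOf done hdvd
      show (if (done ++ p).length = 0 then (([] : List Int), "empty bit string")
          else if PySem.Int.mod (((done ++ p).length : Int)) 12 ≠ 0 then
            (([] : List Int), "bit count " ++ PySem.Int.toStr (((done ++ p).length : Int)) ++ " not multiple of 12")
          else (pvWordsA (done ++ p), "")) =
        (if 12 * (((wordsOf done).length : Int)) + ((p.length : Int)) = 0 then (([] : List Int), "empty bit string")
          else if ((p.length : Int)) ≠ 0 then
            (([] : List Int), "bit count " ++ PySem.Int.toStr (12 * (((wordsOf done).length : Int)) + ((p.length : Int))) ++ " not multiple of 12")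
          else (wordsOf done, ""))
      by_cases hz : done.length + p.length = 0
      · have hd0 : done = [] := List.length_eq_zero_iff.mp (by omega)
        have hp0 : p = [] := List.length_eq_zero_iff.mp (by omega)
        subst hd0; subst hp0
        simp [wordsOf_nil]
      · have hmod : PySem.Int.mod ((((done ++ p).length : Int))) 12 = ((p.length : Int)) := by
          rw [PySem.Int.mod_eq_emod_of_pos (by norm_num)]
          obtain ⟨k, hk⟩ := hdvd
          simp only [List.length_append]
          omega
        have hlen0 : ¬ ((done ++ p).length = 0) := by simp only [List.length_append]; omega
        have htot0 : ¬ (12 * (((wordsOf done).length : Int)) + ((p.length : Int)) = 0) := by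
          omega
        by_cases hm : p.length = 0
        · have hp0 : p = [] := List.length_eq_zero_iff.mp hm
          subst hp0
          simp only [List.append_nil, List.length_nil, Nat.cast_zero, add_zero] at hmod hlen0 htot0 ⊢
          rw [if_neg hlen0]
          rw [if_neg (show ¬ (PySem.Int.mod ((done.length : Int)) 12 ≠ 0) from by rw [hmod]; simp)]
          rw [if_neg htot0]
          rw [if_neg (show ¬ ((0 : Int) ≠ 0) from by simp)]
          rw [wordsA_eq done hdvd]
        · have hmodne : PySem.Int.mod (((done ++ p).length : Int)) 12 ≠ 0 := by
            rw [hmod]; simpa using hm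
          have hcntne : ((p.length : Int)) ≠ 0 := by simpa using hm
          have harg : (((done ++ p).length : Int)) =
              12 * (((wordsOf done).length : Int)) + ((p.length : Int)) := by
            simp only [List.length_append]
            omega
          rw [if_neg hlen0, if_pos hmodne, if_neg htot0, if_pos hcntne, harg]
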